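-- pv_equiv track=rewrite | github.com/sarkar4777/abenix | apps/agent-runtime/engine/tools/tavily_search.py | _build_provider_order
-- ===== SOURCE A (Python) =====
-- _PROVIDERS = [
--     ("tavily", "TAVILY_API_KEY", "https://api.tavily.com/search"),
--     ("brave", "BRAVE_SEARCH_API_KEY", "https://api.search.brave.com/res/v1/web/search"),
--     ("serpapi", "SERPAPI_API_KEY", "https://serpapi.com/search"),
--     ("serper", "SERPER_API_KEY", "https://google.serper.dev/search"),
-- ]
--
-- def _build_provider_order(preferred: str) -> list[tuple[str, str, str]]:
--     """Return provider list with the preferred one first."""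
--     ordered: list[tuple[str, str, str]] = []
--     rest: list[tuple[str, str, str]] = []
--     for entry in _PROVIDERS:
--         if entry[0] == preferred:
--             ordered.insert(0, entry)
--         else:
--             rest.append(entry)
--     return ordered + rest
-- ===== SOURCE B (Python) =====
-- _PROVIDERS = [
--     ("tavily", "TAVILY_API_KEY", "https://api.tavily.com/search"),
--     ("brave", "BRAVE_SEARCH_API_KEY", "https://api.search.brave.com/res/v1/web/search"),
--     ("serpapi", "SERPAPI_API_KEY", "https://serpapi.com/search"),
--     ("serper", "SERPER_API_KEY", "https://google.serper.dev/search"),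
-- ]
--
-- def _build_provider_order(preferred: str) -> list[tuple[str, str, str]]:
--     """Return provider list with the preferred one first (stable sort on a boolean key)."""
--     return sorted(_PROVIDERS, key=lambda e: e[0] != preferred)
-- ===== Notes on version B (the rewrite author's own statement) =====
-- stated objective: idiomatic
-- what changed: Replaced the two-accumulator partition loop with a single stable sort keyed on whether the entry's name differs from the preferred one, which puts the preferred provider first and keeps the rest in original order.
import Mathlib
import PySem

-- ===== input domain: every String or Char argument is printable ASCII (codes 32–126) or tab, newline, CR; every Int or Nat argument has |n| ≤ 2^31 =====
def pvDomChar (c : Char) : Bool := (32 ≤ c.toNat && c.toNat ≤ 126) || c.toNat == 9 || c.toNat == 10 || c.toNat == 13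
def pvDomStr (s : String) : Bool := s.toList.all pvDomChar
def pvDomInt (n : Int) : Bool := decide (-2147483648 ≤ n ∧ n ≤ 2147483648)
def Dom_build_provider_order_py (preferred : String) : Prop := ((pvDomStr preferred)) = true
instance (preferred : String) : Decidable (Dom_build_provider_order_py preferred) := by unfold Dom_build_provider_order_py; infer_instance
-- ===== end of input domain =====

-- B replaces A's two-accumulator partition loop by one stable sort on the boolean key "name ≠ preferred" (idiomatic; same result).


def pvProviders : List (String × String × String) :=
  [("tavily", "TAVILY_API_KEY", "https://api.tavily.com/search"),
   ("brave", "BRAVE_SEARCH_API_KEY", "https://api.search.brave.com/res/v1/web/search"),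
   ("serpapi", "SERPAPI_API_KEY", "https://serpapi.com/search"),
   ("serper", "SERPER_API_KEY", "https://google.serper.dev/search")]

-- ===== PORT A =====
-- the loop keeps two accumulators: 'ordered' (insert at 0) and 'rest' (append)
def build_provider_order_py (preferred : String) : List (String × String × String) :=
  let st := pvProviders.foldl
    (fun (acc : List (String × String × String) × List (String × String × String)) entry =>
      if entry.1 == preferred then (entry :: acc.1, acc.2) else (acc.1, acc.2 ++ [entry]))
    ([], [])
  st.1 ++ st.2

-- ===== PORT B =====
-- stable sort on the key 'e[0] != preferred' (False < True rendered as 0 < 1 : Int)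
def build_provider_order_py_alt (preferred : String) : List (String × String × String) :=
  PySem.List.sorted pvProviders (fun e => if e.1 != preferred then (1 : Int) else 0) false

-- ===== PRECONDITION & SPEC =====
def Spec_build_provider_order_py (preferred : String) (out : List (String × String × String)) : Prop := out = build_provider_order_py_alt preferred
instance (preferred : String) (out : List (String × String × String)) : Decidable (Spec_build_provider_order_py preferred out) := by unfold Spec_build_provider_order_py; infer_instance

-- ===== CLAIM (what is proved, stated in full; the proofs are below) =====
def Claim_equal_build_provider_order_py : Prop := ∀ (preferred : String), Dom_build_provider_order_py preferred → Spec_build_provider_order_py preferred (build_provider_order_py preferred)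

-- ===== LEMMAS AND PROOFS =====
theorem bpo_default (preferred : String)
    (h1 : ¬ "tavily" = preferred) (h2 : ¬ "brave" = preferred)
    (h3 : ¬ "serpapi" = preferred) (h4 : ¬ "serper" = preferred) :
    build_provider_order_py preferred = build_provider_order_py_alt preferred := by
  unfold build_provider_order_py build_provider_order_py_alt pvProviders
  simp [List.foldl, h1, h2, h3, h4, PySem.List.sorted, PySem.List.insertBy, bne]

-- ===== VERDICT (by name: the statement is the Claim_ definition above) =====
theorem build_provider_order_py_spec : Claim_equal_build_provider_order_py := by
  intro preferred _
  show build_provider_order_py preferred = build_provider_order_py_alt preferred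
  by_cases h1 : "tavily" = preferred
  · subst h1; decide
  by_cases h2 : "brave" = preferred
  · subst h2; decide
  by_cases h3 : "serpapi" = preferred
  · subst h3; decide
  by_cases h4 : "serper" = preferred
  · subst h4; decide
  exact bpo_default preferred h1 h2 h3 h4
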